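-- pv_equiv track=rewrite | github.com/AlvaroGC03/Edici-n-de-cadenas-de-caracteres | Backend.py | Combinacion_rango
-- ===== SOURCE A (Python) =====
-- def Combinacion_cadenas(ListaCadenas):
--     if len(set(map(len, ListaCadenas))) > 1: #Se verifica que todas las cadenas tengan la misma longitud
--         raise ValueError("Las cadenas deben tener la misma longitud") #Si no tienen la misma longitud, se levanta un error
--
--     combinaciones = set(ListaCadenas) #Se crea un conjunto ya inicializado con las cadenas "originales"
--
--     for i in range(len(ListaCadenas[0])): #Bucle para recorrer cada uno de los elementos de las cadenas
--         for j in range(len(ListaCadenas)): #Bucle para recorrer cada una de las cadenas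
--             if all(cadena[i] == ListaCadenas[j][i] for cadena in ListaCadenas): #Si el elemento de la cadena en la posicion i es igual al de la cadena j en la posicion i
--                 continue #Se continua con el siguiente elemento
--             for combinacion in list(combinaciones): #Bucle para recorrer cada una de las cadenas del conjunto combinaciones
--                 nueva_combinacion = list(combinacion) #Se convierte la cadena en una lista
--                 nueva_combinacion[i] = ListaCadenas[j][i] #Se reemplaza el elemento de la cadena por el de la cadena j
--                 combinaciones.add(''.join(nueva_combinacion)) #Se agrega la nueva combinacion al conjunto ya convertido nuevamente en cadena
--
--     return combinaciones
--
-- def Combinacion_rango(ListaChunks, cadena, rango_inicio, rango_fin):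
--     Variantes = [] #Lista de variantes de la cadena
--     Variantes.append(cadena) #Se agrega la cadena original a la lista de variantes
--     Sublista=ListaChunks[rango_inicio:rango_fin] #Se obtiene la sublista de chunks
--     if rango_inicio == rango_fin:
--         Sublista = [ListaChunks[rango_inicio]]
--     for chunk in Sublista: #Bucle para recorrer cada una de las listas de chunks
--         for variante in chunk: #Bucle para recorrer cada una de las variantes en el chunk actual
--             if variante not in Variantes and variante != cadena: #Si la variante no esta en la lista de variantes y es diferente a la cadena original
--                 Variantes.append(variante) #Se agrega la variante a la lista de variantes
--     Combinaciones = Combinacion_cadenas(Variantes) #Se obtiene la combinacion de las variantes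
--     return Combinaciones #Se retorna el conjunto de combinaciones
-- ===== SOURCE B (Python) =====
-- def Combinacion_rango(ListaChunks, cadena, rango_inicio, rango_fin):
--     if rango_inicio == rango_fin:
--         sub = [ListaChunks[rango_inicio]]
--     else:
--         sub = ListaChunks[rango_inicio:rango_fin]
--     variantes = list(dict.fromkeys([cadena] + [v for chunk in sub for v in chunk]))
--     if len(set(map(len, variantes))) > 1:
--         raise ValueError("Las cadenas deben tener la misma longitud")
--     # varying columns with their distinct characters (first-appearance order)
--     cols = []
--     for i in range(len(cadena)):
--         cs = list(dict.fromkeys(v[i] for v in variantes))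
--         if len(cs) > 1:
--             cols.append((i, cs))
--     # enumerate override maps (which cells to rewrite) as pure data, no strings yet
--     overrides = [[]]
--     for i, cs in cols:
--         overrides = overrides + [ov + [(i, c)] for c in cs for ov in overrides]
--     # materialize each override applied to each variant exactly once
--     out = []
--     seen = set()
--     for ov in overrides:
--         for v in variantes:
--             w = list(v)
--             for i, c in ov:
--                 w[i] = c
--             s = ''.join(w)
--             if s not in seen:
--                 seen.add(s)
--                 out.append(s)
--     return set(out)
-- ===== Notes on version B (the rewrite author's own statement) =====
-- stated objective: alternative
-- what changed: B never rewrites a growing string set: it computes each column's distinct characters once, enumerates the cell-override combinations as pure (index,char) data by a doubling fold over the varying columns, and then materializes each (override, variant) string exactly once with a single dedup pass, instead of A's per-column, per-variant snapshot-and-rescan substitution loops over the whole combination set.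
import Mathlib
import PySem

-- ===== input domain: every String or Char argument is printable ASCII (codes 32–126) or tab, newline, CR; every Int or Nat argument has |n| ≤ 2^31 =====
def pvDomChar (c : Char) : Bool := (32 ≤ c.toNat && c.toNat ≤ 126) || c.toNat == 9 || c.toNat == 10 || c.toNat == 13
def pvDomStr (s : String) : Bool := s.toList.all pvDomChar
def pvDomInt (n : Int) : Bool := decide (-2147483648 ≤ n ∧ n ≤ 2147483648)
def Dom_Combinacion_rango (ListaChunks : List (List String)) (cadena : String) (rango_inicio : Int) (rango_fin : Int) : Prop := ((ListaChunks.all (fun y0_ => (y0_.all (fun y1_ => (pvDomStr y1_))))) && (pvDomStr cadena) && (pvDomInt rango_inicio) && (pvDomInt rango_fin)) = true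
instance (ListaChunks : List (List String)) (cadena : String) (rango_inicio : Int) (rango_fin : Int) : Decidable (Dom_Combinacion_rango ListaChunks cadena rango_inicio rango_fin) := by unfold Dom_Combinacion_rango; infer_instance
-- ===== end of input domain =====

-- B replaces A's repeated rewrite-and-rescan of a growing string set by a staged pipeline: it
-- computes each column's distinct characters, enumerates the cell-override combinations as pure
-- data, and materializes every (override, variant) string exactly once.

-- ===== PORT A =====

-- nueva_combinacion = list(combinacion); nueva_combinacion[i] = c; ''.join(nueva_combinacion)
-- exact for i < len(s), the only reachable case (all strings share one length and i ranges over it)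
def pvSubstA (s : String) (i : Nat) (c : Char) : String :=
  String.ofList (s.toList.set i c)

def Combinacion_cadenas (ListaCadenas : List String) : List String :=
  if 1 < (PySem.Set.ofList (ListaCadenas.map String.length)).length then
    []  -- Python: raise ValueError("Las cadenas deben tener la misma longitud"); excluded by Pre_
  else
    -- combinaciones = set(ListaCadenas), then the three nested loops
    (List.range (ListaCadenas.headD "").length).foldl (fun combinaciones i =>
      (List.range ListaCadenas.length).foldl (fun combinaciones j =>
        if ListaCadenas.all (fun cadena =>
            cadena.toList.getD i ' ' == (ListaCadenas.getD j "").toList.getD i ' ') then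
          combinaciones
        else
          -- for combinacion in list(combinaciones): combinaciones.add(…)
          combinaciones.foldl (fun combs combinacion =>
            PySem.Set.add combs (pvSubstA combinacion i ((ListaCadenas.getD j "").toList.getD i ' ')))
            combinaciones)
        combinaciones)
      (PySem.Set.ofList ListaCadenas)

def Combinacion_rango (ListaChunks : List (List String)) (cadena : String) (rango_inicio : Int) (rango_fin : Int) : List String :=
  let Variantes : List String := [cadena]
  let Sublista : List (List String) := PySem.List.slice ListaChunks (some rango_inicio) (some rango_fin)
  let Sublista : List (List String) :=
    if rango_inicio = rango_fin then
      match PySem.List.pyGet? ListaChunks rango_inicio with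
      | some ch => [ch]
      | none => []  -- Python: IndexError; excluded by Pre_
    else Sublista
  let Variantes : List String := Sublista.foldl (fun Vs chunk =>
    chunk.foldl (fun Vs variante =>
      if variante ∉ Vs ∧ variante ≠ cadena then Vs ++ [variante] else Vs) Vs) Variantes
  Combinacion_cadenas Variantes

-- ===== PORT B =====

-- w = list(v); for (i, c) in ov: w[i] = c; ''.join(w)
-- exact for i < len(v), the only reachable case (all admitted strings share cadena's length)
def pvApply (ov : List (Nat × Char)) (v : String) : String :=
  String.ofList (ov.foldl (fun w ic => w.set ic.1 ic.2) v.toList)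

def Combinacion_rango_alt (ListaChunks : List (List String)) (cadena : String) (rango_inicio : Int) (rango_fin : Int) : List String :=
  let sub : List (List String) :=
    if rango_inicio = rango_fin then
      match PySem.List.pyGet? ListaChunks rango_inicio with
      | some ch => [ch]
      | none => []  -- Python: IndexError; excluded by Pre_
    else PySem.List.slice ListaChunks (some rango_inicio) (some rango_fin)
  -- variantes = list(dict.fromkeys([cadena] + [v for chunk in sub for v in chunk]))
  let variantes : List String := PySem.List.dedup (cadena :: sub.flatten)
  if 1 < (PySem.Set.ofList (variantes.map String.length)).length then
    []  -- Python: raise ValueError("Las cadenas deben tener la misma longitud"); excluded by Pre_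
  else
    -- varying columns with their distinct characters (first-appearance order)
    let cols : List (Nat × List Char) :=
      (List.range cadena.length).foldl (fun acc i =>
        if 1 < (PySem.List.dedup (variantes.map (fun v => v.toList.getD i ' '))).length then
          acc ++ [(i, PySem.List.dedup (variantes.map (fun v => v.toList.getD i ' ')))]
        else acc) []
    -- overrides = [[]]; for i, cs in cols: overrides = overrides + [ov + [(i,c)] for c in cs for ov in overrides]
    let overrides : List (List (Nat × Char)) :=
      cols.foldl (fun ovs p =>
        ovs ++ p.2.flatMap (fun c => ovs.map (fun ov => ov ++ [(p.1, c)]))) [[]]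
    -- out/seen loop: each override applied to each variant, first occurrences kept
    overrides.foldl (fun out ov =>
      variantes.foldl (fun out v => PySem.Set.add out (pvApply ov v)) out) []

-- ===== PRECONDITION & SPEC =====

-- Pre_ excludes exactly the inputs where the Python raises: an out-of-range ListaChunks[rango_inicio]
-- when rango_inicio == rango_fin (IndexError), and selected variant strings whose length differs from
-- cadena's (ValueError in Combinacion_cadenas).
def Pre_Combinacion_rango (ListaChunks : List (List String)) (cadena : String) (rango_inicio : Int) (rango_fin : Int) : Prop :=
  if rango_inicio = rango_fin then
    PySem.Raise.InRange ListaChunks.length rango_inicio ∧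
    ∀ v ∈ PySem.List.pyGetD ListaChunks rango_inicio [], v.length = cadena.length
  else
    ∀ chunk ∈ PySem.List.slice ListaChunks (some rango_inicio) (some rango_fin),
      ∀ v ∈ chunk, v.length = cadena.length

instance (ListaChunks : List (List String)) (cadena : String) (rango_inicio : Int) (rango_fin : Int) : Decidable (Pre_Combinacion_rango ListaChunks cadena rango_inicio rango_fin) := by
  unfold Pre_Combinacion_rango; infer_instance

def pvWitness_Combinacion_rango : List (List String) × String × Int × Int :=
  ([["ab", "cb"], ["ad"]], "aa", 0, 2)

def Spec_Combinacion_rango (ListaChunks : List (List String)) (cadena : String) (rango_inicio : Int) (rango_fin : Int) (out : List String) : Prop := out = Combinacion_rango_alt ListaChunks cadena rango_inicio rango_fin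
instance (ListaChunks : List (List String)) (cadena : String) (rango_inicio : Int) (rango_fin : Int) (out : List String) : Decidable (Spec_Combinacion_rango ListaChunks cadena rango_inicio rango_fin out) := by unfold Spec_Combinacion_rango; infer_instance

-- ===== CLAIM (what is proved, stated in full; the proofs are below) =====
def Claim_equal_Combinacion_rango : Prop := ∀ (ListaChunks : List (List String)) (cadena : String) (rango_inicio : Int) (rango_fin : Int), Dom_Combinacion_rango ListaChunks cadena rango_inicio rango_fin → Pre_Combinacion_rango ListaChunks cadena rango_inicio rango_fin → Spec_Combinacion_rango ListaChunks cadena rango_inicio rango_fin (Combinacion_rango ListaChunks cadena rango_inicio rango_fin)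

-- ===== LEMMAS AND PROOFS =====

-- substitution basics ---------------------------------------------------------

def pvSubstB (s : String) (i : Nat) (c : Char) : String :=
  String.ofList (s.toList.take i ++ c :: s.toList.drop (i + 1))

theorem pv_toList_substB (s : String) (i : Nat) (c : Char) :
    (pvSubstB s i c).toList = s.toList.take i ++ c :: s.toList.drop (i + 1) := by
  simp [pvSubstB]

theorem pv_length_substB (s : String) (i : Nat) (c : Char) (h : i < s.toList.length) :
    (pvSubstB s i c).toList.length = s.toList.length := by
  rw [pv_toList_substB]
  simp only [List.length_append, List.length_cons, List.length_take, List.length_drop]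
  omega

theorem pv_substA_eq_substB (s : String) (i : Nat) (c : Char) (h : i < s.toList.length) :
    pvSubstA s i c = pvSubstB s i c := by
  unfold pvSubstA pvSubstB
  rw [List.set_eq_take_append_cons_drop, if_pos h]

theorem pv_substB_substB (s : String) (i : Nat) (c c' : Char) (h : i < s.toList.length) :
    pvSubstB (pvSubstB s i c') i c = pvSubstB s i c := by
  unfold pvSubstB
  simp only [String.toList_ofList]
  have h1 : (s.toList.take i).length = i := by
    simp only [List.length_take]; omega
  rw [List.take_left' h1, show (s.toList.take i ++ c' :: s.toList.drop (i + 1)) = (s.toList.take i ++ [c']) ++ s.toList.drop (i+1) by simp,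
     List.drop_left' (by simp only [List.length_append, List.length_take, List.length_cons, List.length_nil]; omega)]

theorem pv_getD_substB (s : String) (i k : Nat) (c : Char)
    (hi : i < s.toList.length) (hk : k < s.toList.length) :
    (pvSubstB s i c).toList.getD k ' ' = if k = i then c else s.toList.getD k ' ' := by
  rw [pv_toList_substB]
  have h1 : (s.toList.take i).length = i := by simp only [List.length_take]; omega
  have hlen : (s.toList.take i ++ c :: s.toList.drop (i + 1)).length = s.toList.length := by
    simp only [List.length_append, List.length_cons, List.length_take, List.length_drop]; omega
  rw [List.getD_eq_getElem _ _ (by omega), List.getD_eq_getElem _ _ hk]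
  by_cases hki : k = i
  · subst hki
    rw [List.getElem_append_right (by omega)]
    simp [h1]
  · rcases Nat.lt_or_gt_of_ne hki with hlt | hgt
    · rw [List.getElem_append_left (by omega)]
      simp [List.getElem_take, hki]
    · rw [List.getElem_append_right (by omega)]
      simp only [h1]
      have e : k - i = (k - i - 1) + 1 := by omega
      rw [if_neg hki]
      rw [getElem_congr rfl e (by simp only [List.length_cons, List.length_drop]; omega), List.getElem_cons_succ, List.getElem_drop]
      congr 1
      omega

theorem pv_foldl_range_getD {α β : Type} [Inhabited β] (xs : List β) (d : β)
    (F : α → β → α) (init : α) :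
    (List.range xs.length).foldl (fun acc j => F acc (xs.getD j d)) init = xs.foldl F init := by
  have h : (List.range xs.length).map (fun j => xs.getD j d) = xs := by
    apply List.ext_getElem
    · simp
    · intro i h1 h2
      simp [List.getElem?_eq_getElem (by simpa using h2)]
  conv_rhs => rw [← h]
  rw [List.foldl_map]

theorem pv_update_absorb {α : Type} [BEq α] [LawfulBEq α] (s : PySem.Set α) (l : List α)
    (h : ∀ x ∈ l, x ∈ s) : PySem.Set.update s l = s := by
  rw [PySem.Set.update_eq_append_filter]
  have hfil : List.filter (fun y => !s.contains y) (PySem.Set.ofList l) = [] := by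
    apply List.filter_eq_nil_iff.mpr
    intro a ha
    have h2 : a ∈ s := h a ((PySem.Set.mem_ofList _ _).mp ha)
    simpa [PySem.Set.contains_iff] using h2
  rw [hfil, List.append_nil]

theorem pv_dedup_const (cs : List Char) (c₀ : Char) (hne : cs ≠ [])
    (h : ∀ x ∈ cs, x = c₀) : PySem.List.dedup cs = [c₀] := by
  have : ∀ x ∈ PySem.List.dedup cs, x = c₀ := by
    intro x hx; exact h x ((PySem.List.mem_dedup _ _).mp hx)
  have hmem : c₀ ∈ PySem.List.dedup cs := by
    rcases cs with _ | ⟨c, rest⟩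
    · simp at hne
    · exact (PySem.List.mem_dedup _ _).mpr (List.mem_cons.mpr (Or.inl (h c (by simp)).symm))
  have hnd : (PySem.List.dedup cs).Nodup := PySem.List.nodup_dedup cs
  rcases hd : PySem.List.dedup cs with _ | ⟨a, rest⟩
  · rw [hd] at hmem; simp at hmem
  · rw [hd] at this hnd hmem
    have ha := this a (by simp)
    subst ha
    rcases rest with _ | ⟨b, r2⟩
    · rfl
    · have hb := this b (by simp)
      simp [hb] at hnd

theorem pv_dedup_cons_eq_self {α : Type} [BEq α] [LawfulBEq α] (x : α) (xs : List α) :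
    ∃ t, PySem.List.dedup (x :: xs) = x :: t := by
  rw [PySem.List.dedup_eq_ofList, PySem.Set.ofList_cons]
  exact ⟨_, rfl⟩

theorem pv_variantes (cadena : String) (sub : List (List String)) :
    sub.foldl (fun Vs chunk =>
      chunk.foldl (fun Vs variante =>
        if variante ∉ Vs ∧ variante ≠ cadena then Vs ++ [variante] else Vs) Vs) [cadena]
    = PySem.List.dedup (cadena :: sub.flatten) := by
  have key : ∀ (xs : List String) (acc : List String), cadena ∈ acc →
      xs.foldl (fun Vs variante =>
        if variante ∉ Vs ∧ variante ≠ cadena then Vs ++ [variante] else Vs) acc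
      = PySem.Set.update acc xs := by
    intro xs
    induction xs with
    | nil => intro acc _; rfl
    | cons x xs ih =>
      intro acc hc
      rw [List.foldl_cons, PySem.Set.update_cons]
      have hstep : (if x ∉ acc ∧ x ≠ cadena then acc ++ [x] else acc) = PySem.Set.add acc x := by
        by_cases hx : x ∈ acc
        · rw [PySem.Set.add_of_mem hx, if_neg (by tauto)]
        · have hxc : x ≠ cadena := fun he => hx (he ▸ hc)
          rw [PySem.Set.add_of_not_mem hx, if_pos ⟨hx, hxc⟩]
      rw [hstep]
      exact ih _ (by rw [PySem.Set.mem_add]; left; exact hc)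
  rw [← List.foldl_flatten]
  rw [key _ _ (by simp)]
  have hadd : PySem.Set.add ([] : List String) cadena = [cadena] := by
    rw [PySem.Set.add_of_not_mem (by simp)]; rfl
  rw [PySem.List.dedup_eq_ofList, PySem.Set.ofList_eq_foldl, List.foldl_cons, hadd]
  rfl

theorem pv_discard_eq_filter {α : Type} [BEq α] (s : PySem.Set α) (x : α) :
    PySem.Set.discard s x = s.filter (fun y => !(y == x)) := by
  unfold PySem.Set.discard; rfl

theorem pv_abs (S₀ D : List String) (i : Nat) (c : Char)
    (hD : ∀ d ∈ D, ∃ s ∈ S₀, d = pvSubstB s i c)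
    (hlen : ∀ s ∈ S₀, i < s.toList.length) :
    ∀ (rest : List Char) (T : List String),
      PySem.Set.update T (rest.flatMap (fun c' => (S₀ ++ D).map (fun s => pvSubstB s i c'))) =
      PySem.Set.update T (rest.flatMap (fun c' => S₀.map (fun s => pvSubstB s i c'))) := by
  intro rest
  induction rest with
  | nil => intro T; rfl
  | cons c' rest ih =>
    intro T
    rw [List.flatMap_cons, List.flatMap_cons, PySem.Set.update_append, PySem.Set.update_append]
    have hblk : PySem.Set.update T ((S₀ ++ D).map (fun s => pvSubstB s i c'))
        = PySem.Set.update T (S₀.map (fun s => pvSubstB s i c')) := by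
      rw [List.map_append, PySem.Set.update_append]
      apply pv_update_absorb
      intro x hx
      obtain ⟨d, hd, rfl⟩ := List.mem_map.mp hx
      obtain ⟨t, ht, rfl⟩ := hD d hd
      rw [pv_substB_substB _ _ _ _ (hlen t ht)]
      exact (PySem.Set.mem_update _ _ _).mpr (Or.inr (List.mem_map.mpr ⟨t, ht, rfl⟩))
    rw [hblk, ih]

theorem pv_key (i : Nat) : ∀ (cs : List Char) (S : List String),
    (∀ s ∈ S, i < s.toList.length) → S.Nodup →
    cs.foldl (fun T c => PySem.Set.update T (T.map (fun s => pvSubstB s i c))) S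
      = PySem.Set.update S (cs.flatMap (fun c => S.map (fun s => pvSubstB s i c))) := by
  intro cs
  induction cs with
  | nil => intro S _ _; rfl
  | cons c cs ih =>
    intro S hlen hnd
    rw [List.foldl_cons]
    have hS1form := PySem.Set.update_eq_append_filter S (S.map (fun s => pvSubstB s i c))
    set D := List.filter (fun y => !S.contains y)
      (PySem.Set.ofList (S.map (fun s => pvSubstB s i c))) with hDdef
    have hDmem : ∀ d ∈ D, ∃ s ∈ S, d = pvSubstB s i c := by
      intro d hd
      have hd2 : d ∈ S.map (fun s => pvSubstB s i c) :=
        (PySem.Set.mem_ofList _ _).mp (List.mem_of_mem_filter hd)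
      obtain ⟨t, ht, rfl⟩ := List.mem_map.mp hd2
      exact ⟨t, ht, rfl⟩
    have hlen1 : ∀ s ∈ PySem.Set.update S (S.map (fun s => pvSubstB s i c)),
        i < s.toList.length := by
      intro s hs
      rcases (PySem.Set.mem_update _ _ _).mp hs with h | h
      · exact hlen s h
      · obtain ⟨t, ht, rfl⟩ := List.mem_map.mp h
        rw [pv_length_substB _ _ _ (hlen t ht)]
        exact hlen t ht
    have hnd1 : (PySem.Set.update S (S.map (fun s => pvSubstB s i c))).Nodup :=
      PySem.Set.nodup_update _ _ hnd
    rw [ih _ hlen1 hnd1, List.flatMap_cons, PySem.Set.update_append, hS1form]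
    exact pv_abs S D i c hDmem hlen cs (S ++ D)

theorem pv_dedupcol {α : Type} [BEq α] [LawfulBEq α] (h : α → List String) :
    ∀ (cs : List α) (T : List String),
      PySem.Set.update T (cs.flatMap h) = PySem.Set.update T ((PySem.List.dedup cs).flatMap h) := by
  intro cs
  induction cs with
  | nil => intro T; rfl
  | cons c rest ih =>
    intro T
    rw [List.flatMap_cons, PySem.Set.update_append,
      PySem.List.dedup_eq_ofList, PySem.Set.ofList_cons, List.flatMap_cons,
      PySem.Set.update_append, ih (PySem.Set.update T (h c)), ← PySem.List.dedup_eq_ofList]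
    have hsub : ∀ x ∈ h c, x ∈ PySem.Set.update T (h c) := by
      intro x hx
      exact (PySem.Set.mem_update _ _ _).mpr (Or.inr hx)
    by_cases hc : c ∈ PySem.List.dedup rest
    · obtain ⟨l1, l2, hsplit⟩ := List.append_of_mem hc
      have hnd := PySem.List.nodup_dedup rest
      rw [hsplit] at hnd ⊢
      have hc1 : c ∉ l1 ∧ c ∉ l2 := by
        constructor
        · intro hmem
          exact (List.disjoint_of_nodup_append hnd) hmem (by simp)
        · have := (List.nodup_append.mp hnd).2.1
          simp at this
          exact this.1
      have hdisc : PySem.Set.discard (l1 ++ c :: l2) c = l1 ++ l2 := by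
        rw [pv_discard_eq_filter, List.filter_append, List.filter_cons]
        have h1 : List.filter (fun y => !(y == c)) l1 = l1 := List.filter_eq_self.mpr
          (by intro a ha; simp; intro he; exact hc1.1 (he ▸ ha))
        have h2 : List.filter (fun y => !(y == c)) l2 = l2 := List.filter_eq_self.mpr
          (by intro a ha; simp; intro he; exact hc1.2 (he ▸ ha))
        simp [h1, h2]
      rw [hdisc, List.flatMap_append, List.flatMap_append, List.flatMap_cons,
        PySem.Set.update_append, PySem.Set.update_append, PySem.Set.update_append]
      congr 1
      apply pv_update_absorb
      intro x hx
      exact (PySem.Set.mem_update _ _ _).mpr (Or.inl (hsub x hx))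
    · have hdisc : PySem.Set.discard (PySem.List.dedup rest) c = PySem.List.dedup rest := by
        rw [pv_discard_eq_filter]
        apply List.filter_eq_self.mpr
        intro a ha
        simp
        intro he
        exact hc (he ▸ ha)
      rw [hdisc]

-- per-column equality under the invariant --------------------------------------

def pvInv (V : List String) (L : Nat) (S : List String) : Prop :=
  S.Nodup ∧ (∀ s ∈ S, s.toList.length = L) ∧
  (∀ s ∈ S, ∀ k : Nat, k < L → ∃ v ∈ V, s.toList.getD k ' ' = v.toList.getD k ' ')

def pvStepA (V : List String) (i : Nat) (S : List String) : List String :=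
  (List.range V.length).foldl (fun combinaciones j =>
    if V.all (fun cadena =>
        cadena.toList.getD i ' ' == (V.getD j "").toList.getD i ' ') then
      combinaciones
    else
      combinaciones.foldl (fun combs combinacion =>
        PySem.Set.add combs (pvSubstA combinacion i ((V.getD j "").toList.getD i ' ')))
        combinaciones)
    S

def pvStepB (V : List String) (i : Nat) (S : List String) : List String :=
  if 1 < (PySem.List.dedup (V.map (fun v => v.toList.getD i ' '))).length then
    PySem.List.dedup (S ++ (PySem.List.dedup (V.map (fun v => v.toList.getD i ' '))).flatMap
      (fun c => S.map (fun s => pvSubstB s i c)))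
  else S

theorem pv_len_le_one {α : Type} [BEq α] [LawfulBEq α] (xs : List α)
    (h : (PySem.Set.ofList xs).length ≤ 1) : ∀ a ∈ xs, ∀ b ∈ xs, a = b := by
  intro a ha b hb
  have ha' : a ∈ PySem.Set.ofList xs := (PySem.Set.mem_ofList _ _).mpr ha
  have hb' : b ∈ PySem.Set.ofList xs := (PySem.Set.mem_ofList _ _).mpr hb
  rcases hl : PySem.Set.ofList xs with _ | ⟨x, rest⟩
  · rw [hl] at ha'; simp at ha'
  · rw [hl] at ha' hb' h
    rcases rest with _ | ⟨y, r⟩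
    · simp at ha' hb'; rw [ha', hb']
    · simp at h

theorem pv_stepA_to_key (V : List String) (i : Nat)
    (hfalse : ∀ v ∈ V, (V.all (fun cadena =>
      cadena.toList.getD i ' ' == v.toList.getD i ' ')) = false) :
    ∀ (vs : List String) (T : List String), (∀ v ∈ vs, v ∈ V) →
      (∀ s ∈ T, i < s.toList.length) →
      vs.foldl (fun combinaciones v =>
        if V.all (fun cadena =>
            cadena.toList.getD i ' ' == v.toList.getD i ' ') then
          combinaciones
        else
          combinaciones.foldl (fun combs combinacion =>
            PySem.Set.add combs (pvSubstA combinacion i (v.toList.getD i ' ')))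
            combinaciones) T
      = (vs.map (fun v => v.toList.getD i ' ')).foldl
          (fun T c => PySem.Set.update T (T.map (fun s => pvSubstB s i c))) T := by
  intro vs
  induction vs with
  | nil => intro T _ _; rfl
  | cons v vs ih =>
    intro T hvs hT
    rw [List.foldl_cons, List.map_cons, List.foldl_cons, if_neg (by
      rw [hfalse v (hvs v (by simp))]; simp)]
    have hstep : T.foldl (fun combs combinacion =>
        PySem.Set.add combs (pvSubstA combinacion i (v.toList.getD i ' '))) T
        = PySem.Set.update T (T.map (fun s => pvSubstB s i (v.toList.getD i ' '))) := by
      rw [PySem.Set.update_map_eq_foldl_add]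
      apply PySem.List.foldl_congr_mem
      intro acc x hx
      rw [pv_substA_eq_substB _ _ _ (hT x hx)]
    rw [hstep]
    apply ih
    · intro w hw; exact hvs w (by simp [hw])
    · intro s hs
      rcases (PySem.Set.mem_update _ _ _).mp hs with h | h
      · exact hT s h
      · obtain ⟨t, ht, rfl⟩ := List.mem_map.mp h
        rw [pv_length_substB _ _ _ (hT t ht)]
        exact hT t ht

theorem pv_dedup_append_eq_update (S X : List String) (hnd : S.Nodup) :
    PySem.List.dedup (S ++ X) = PySem.Set.update S X := by
  rw [PySem.List.dedup_eq_ofList, PySem.Set.ofList_append,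
    PySem.Set.ofList_eq_self_of_nodup _ hnd]

theorem pv_dedup_two_of_ne {α : Type} [BEq α] [LawfulBEq α] (xs : List α) (a b : α)
    (ha : a ∈ xs) (hb : b ∈ xs) (hne : a ≠ b) : 1 < (PySem.List.dedup xs).length := by
  by_contra h
  exact hne (pv_len_le_one xs (by rw [← PySem.List.dedup_eq_ofList]; omega)
    a ha b hb)

theorem pv_col_eq (V : List String) (L i : Nat) (_hV : ∀ v ∈ V, v.toList.length = L)
    (hVne : V ≠ []) (hi : i < L) (S : List String) (hInv : pvInv V L S) :
    pvStepA V i S = pvStepB V i S := by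
  obtain ⟨hnd, hlenS, hcol⟩ := hInv
  have hlenS' : ∀ s ∈ S, i < s.toList.length := fun s hs => by rw [hlenS s hs]; exact hi
  unfold pvStepA pvStepB
  rw [pv_foldl_range_getD V "" (fun combinaciones v =>
    if V.all (fun cadena =>
        cadena.toList.getD i ' ' == v.toList.getD i ' ') then
      combinaciones
    else
      List.foldl (fun combs combinacion =>
        PySem.Set.add combs (pvSubstA combinacion i (v.toList.getD i ' ')))
        combinaciones combinaciones) S]
  by_cases hconst : ∀ v ∈ V, ∀ w ∈ V, v.toList.getD i ' ' = w.toList.getD i ' '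
  · obtain ⟨v₀, hv₀⟩ := List.exists_mem_of_ne_nil V hVne
    have hcs : PySem.List.dedup (V.map (fun v => v.toList.getD i ' '))
        = [v₀.toList.getD i ' '] := by
      apply pv_dedup_const
      · simp [hVne]
      · intro x hx
        obtain ⟨w, hw, rfl⟩ := List.mem_map.mp hx
        exact hconst w hw v₀ hv₀
    rw [hcs, if_neg (by simp)]
    have h1 := PySem.List.foldl_congr_mem V
      (fun combinaciones v =>
        if V.all (fun cadena =>
            cadena.toList.getD i ' ' == v.toList.getD i ' ') then
          combinaciones
        else
          List.foldl (fun combs combinacion =>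
            PySem.Set.add combs (pvSubstA combinacion i (v.toList.getD i ' ')))
            combinaciones combinaciones)
      (fun acc _ => acc) S (by
        intro acc v hv
        beta_reduce
        rw [if_pos]
        rw [List.all_eq_true]
        intro w hw
        exact beq_iff_eq.mpr (hconst w hw v hv))
    rw [h1]
    exact PySem.List.foldl_ignore _ _
  · push Not at hconst
    obtain ⟨v1, hv1, v2, hv2, hne⟩ := hconst
    have htwo : 1 < (PySem.List.dedup (V.map (fun v => v.toList.getD i ' '))).length :=
      pv_dedup_two_of_ne _ _ _ (List.mem_map.mpr ⟨v1, hv1, rfl⟩)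
        (List.mem_map.mpr ⟨v2, hv2, rfl⟩) hne
    rw [if_pos htwo, pv_dedup_append_eq_update _ _ hnd]
    have hfalse : ∀ v ∈ V, (V.all (fun cadena =>
        cadena.toList.getD i ' ' == v.toList.getD i ' ')) = false := by
      intro v hv
      rw [List.all_eq_false]
      by_cases h1 : v1.toList.getD i ' ' = v.toList.getD i ' '
      · refine ⟨v2, hv2, ?_⟩
        beta_reduce
        simp only [beq_iff_eq]
        intro he
        exact hne (h1.trans he.symm)
      · refine ⟨v1, hv1, ?_⟩
        beta_reduce
        simp only [beq_iff_eq]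
        exact h1
    rw [pv_stepA_to_key V i hfalse V S (fun v hv => hv) hlenS']
    rw [pv_key i _ S hlenS' hnd]
    exact pv_dedupcol _ _ S

theorem pv_col_inv (V : List String) (L i : Nat) (_hV : ∀ v ∈ V, v.toList.length = L)
    (hi : i < L) (S : List String) (hInv : pvInv V L S) :
    pvInv V L (pvStepB V i S) := by
  obtain ⟨hnd, hlenS, hcol⟩ := hInv
  have hlenS' : ∀ s ∈ S, i < s.toList.length := fun s hs => by rw [hlenS s hs]; exact hi
  unfold pvStepB
  split_ifs with hc
  · rw [pv_dedup_append_eq_update _ _ hnd]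
    have hmem : ∀ x ∈ PySem.Set.update S
        ((PySem.List.dedup (V.map (fun v => v.toList.getD i ' '))).flatMap
          (fun c => S.map (fun s => pvSubstB s i c))),
        x ∈ S ∨ ∃ v ∈ V, ∃ s ∈ S, x = pvSubstB s i (v.toList.getD i ' ') := by
      intro x hx
      rcases (PySem.Set.mem_update _ _ _).mp hx with h | h
      · exact Or.inl h
      · obtain ⟨c, hc2, hx2⟩ := List.mem_flatMap.mp h
        obtain ⟨t, ht, rfl⟩ := List.mem_map.mp hx2
        obtain ⟨v, hv, rfl⟩ := List.mem_map.mp ((PySem.List.mem_dedup _ _).mp hc2)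
        exact Or.inr ⟨v, hv, t, ht, rfl⟩
    refine ⟨PySem.Set.nodup_update _ _ hnd, ?_, ?_⟩
    · intro s hs
      rcases hmem s hs with h | ⟨v, hv, t, ht, rfl⟩
      · exact hlenS s h
      · rw [pv_length_substB _ _ _ (hlenS' t ht)]
        exact hlenS t ht
    · intro s hs k hk
      rcases hmem s hs with h | ⟨v, hv, t, ht, rfl⟩
      · exact hcol s h k hk
      · rw [pv_getD_substB t i k _ (hlenS' t ht) (by rw [hlenS t ht]; exact hk)]
        by_cases hki : k = i
        · subst hki
          exact ⟨v, hv, by rw [if_pos rfl]⟩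
        · rw [if_neg hki]
          exact hcol t ht k hk
  · exact ⟨hnd, hlenS, hcol⟩

theorem pv_fold_eq (V : List String) (L : Nat) (hV : ∀ v ∈ V, v.toList.length = L)
    (hVne : V ≠ []) :
    ∀ (js : List Nat) (S : List String), (∀ i ∈ js, i < L) → pvInv V L S →
      js.foldl (fun S i => pvStepA V i S) S = js.foldl (fun S i => pvStepB V i S) S ∧
      pvInv V L (js.foldl (fun S i => pvStepB V i S) S) := by
  intro js
  induction js with
  | nil => intro S _ hInv; exact ⟨rfl, hInv⟩
  | cons i js ih =>
    intro S hjs hInv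
    have hi : i < L := hjs i (by simp)
    rw [List.foldl_cons, List.foldl_cons, pv_col_eq V L i hV hVne hi S hInv]
    exact ih (pvStepB V i S) (fun k hk => hjs k (by simp [hk]))
      (pv_col_inv V L i hV hi S hInv)

-- B-side: relating the staged pvStepB fold to the override enumeration ----------

-- pvStepC: the same per-column expansion but without the intermediate dedups
def pvStepC (V : List String) (i : Nat) (X : List String) : List String :=
  if 1 < (PySem.List.dedup (V.map (fun v => v.toList.getD i ' '))).length then
    X ++ (PySem.List.dedup (V.map (fun v => v.toList.getD i ' '))).flatMap
      (fun c => X.map (fun s => pvSubstB s i c))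
  else X

theorem pv_update_map_filter (f : String → String) (x : String) :
    ∀ (S : List String) (T : PySem.Set String), f x ∈ T →
      PySem.Set.update T ((S.filter (fun y => !(y == x))).map f) =
      PySem.Set.update T (S.map f) := by
  intro S
  induction S with
  | nil => intro T _; rfl
  | cons y S ih =>
    intro T hfx
    rw [List.filter_cons]
    by_cases hyx : y = x
    · rw [if_neg (by simp [hyx]), List.map_cons, PySem.Set.update_cons,
        PySem.Set.add_of_mem (hyx ▸ hfx)]
      exact ih T hfx
    · rw [if_pos (by simp [hyx]), List.map_cons, List.map_cons,
        PySem.Set.update_cons, PySem.Set.update_cons]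
      exact ih (PySem.Set.add T (f y)) ((PySem.Set.mem_add _ _ _).mpr (Or.inl hfx))

theorem pv_update_map_ofList (f : String → String) :
    ∀ (X : List String) (T : PySem.Set String),
      PySem.Set.update T ((PySem.Set.ofList X).map f) = PySem.Set.update T (X.map f) := by
  intro X
  induction X with
  | nil => intro T; rfl
  | cons x X ih =>
    intro T
    rw [PySem.Set.ofList_cons, List.map_cons, List.map_cons, PySem.Set.update_cons,
      PySem.Set.update_cons, pv_discard_eq_filter,
      pv_update_map_filter f x (PySem.Set.ofList X) (PySem.Set.add T (f x))
        ((PySem.Set.mem_add _ _ _).mpr (Or.inr rfl)),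
      ih (PySem.Set.add T (f x))]

theorem pv_update_flatMap_ofList (i : Nat) :
    ∀ (cs : List Char) (X : List String) (T : PySem.Set String),
      PySem.Set.update T (cs.flatMap (fun c => (PySem.Set.ofList X).map (fun s => pvSubstB s i c))) =
      PySem.Set.update T (cs.flatMap (fun c => X.map (fun s => pvSubstB s i c))) := by
  intro cs
  induction cs with
  | nil => intro X T; rfl
  | cons c cs ih =>
    intro X T
    rw [List.flatMap_cons, List.flatMap_cons, PySem.Set.update_append, PySem.Set.update_append,
      pv_update_map_ofList (fun s => pvSubstB s i c) X T, ih]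

-- fold of pvStepB from a set equals the set of the dedup-free fold
theorem pv_T1 (V : List String) :
    ∀ (is : List Nat) (X : List String),
      is.foldl (fun S i => pvStepB V i S) (PySem.Set.ofList X)
        = PySem.Set.ofList (is.foldl (fun X i => pvStepC V i X) X) := by
  intro is
  induction is with
  | nil => intro X; rfl
  | cons i is ih =>
    intro X
    rw [List.foldl_cons, List.foldl_cons]
    have hstep : pvStepB V i (PySem.Set.ofList X) = PySem.Set.ofList (pvStepC V i X) := by
      unfold pvStepB pvStepC
      split_ifs with hc
      · rw [PySem.List.dedup_eq_ofList, PySem.Set.ofList_append, PySem.Set.ofList_ofList,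
          pv_update_flatMap_ofList, ← PySem.Set.ofList_append]
      · rfl
    rw [hstep, ih]

-- applying one more override cell = substituting in the applied string
theorem pv_apply_len (ov : List (Nat × Char)) (l : List Char) :
    (ov.foldl (fun w ic => w.set ic.1 ic.2) l).length = l.length := by
  induction ov generalizing l with
  | nil => rfl
  | cons ic ov ih => rw [List.foldl_cons, ih, List.length_set]

theorem pv_apply_snoc (ov : List (Nat × Char)) (i : Nat) (c : Char) (v : String)
    (h : i < v.toList.length) :
    pvSubstB (pvApply ov v) i c = pvApply (ov ++ [(i, c)]) v := by
  have hlen : (pvApply ov v).toList.length = v.toList.length := by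
    simp [pvApply, pv_apply_len]
  rw [← pv_substA_eq_substB _ _ _ (by rw [hlen]; exact h)]
  unfold pvSubstA pvApply
  rw [List.foldl_append, List.foldl_cons, List.foldl_nil]
  simp

theorem pv_block (V : List String) (L i : Nat) (hV : ∀ v ∈ V, v.toList.length = L)
    (hi : i < L) (c : Char) (ovs : List (List (Nat × Char))) :
    (ovs.flatMap (fun ov => V.map (pvApply ov))).map (fun s => pvSubstB s i c)
      = ovs.flatMap (fun ov => V.map (pvApply (ov ++ [(i, c)]))) := by
  induction ovs with
  | nil => rfl
  | cons ov ovs ih =>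
    rw [List.flatMap_cons, List.flatMap_cons, List.map_append, ih, List.map_map]
    congr 1
    apply List.map_congr_left
    intro v hv
    exact pv_apply_snoc ov i c v (by rw [hV v hv]; exact hi)

theorem pv_expand (V : List String) (L i : Nat) (hV : ∀ v ∈ V, v.toList.length = L)
    (hi : i < L) (ovs : List (List (Nat × Char))) :
    ∀ (cs : List Char),
      cs.flatMap (fun c => (ovs.flatMap (fun ov => V.map (pvApply ov))).map (fun s => pvSubstB s i c))
        = (cs.flatMap (fun c => ovs.map (fun ov => ov ++ [(i, c)]))).flatMap
            (fun ov => V.map (pvApply ov)) := by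
  intro cs
  induction cs with
  | nil => rfl
  | cons c cs ih =>
    rw [List.flatMap_cons, List.flatMap_cons, List.flatMap_append, ih,
      pv_block V L i hV hi c ovs]
    congr 1
    simp [List.flatMap_map]

-- one override step of B's enumeration
def pvOvStep (V : List String) (ovs : List (List (Nat × Char))) (i : Nat) :
    List (List (Nat × Char)) :=
  if 1 < (PySem.List.dedup (V.map (fun v => v.toList.getD i ' '))).length then
    ovs ++ (PySem.List.dedup (V.map (fun v => v.toList.getD i ' '))).flatMap
      (fun c => ovs.map (fun ov => ov ++ [(i, c)]))
  else ovs

theorem pv_T2 (V : List String) (L : Nat) (hV : ∀ v ∈ V, v.toList.length = L) :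
    ∀ (is : List Nat) (ovs : List (List (Nat × Char))), (∀ i ∈ is, i < L) →
      is.foldl (fun X i => pvStepC V i X) (ovs.flatMap (fun ov => V.map (pvApply ov)))
        = (is.foldl (fun ovs i => pvOvStep V ovs i) ovs).flatMap
            (fun ov => V.map (pvApply ov)) := by
  intro is
  induction is with
  | nil => intro ovs _; rfl
  | cons i is ih =>
    intro ovs his
    have hi : i < L := his i (by simp)
    rw [List.foldl_cons, List.foldl_cons]
    have hstep : pvStepC V i (ovs.flatMap (fun ov => V.map (pvApply ov)))
        = (pvOvStep V ovs i).flatMap (fun ov => V.map (pvApply ov)) := by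
      unfold pvStepC pvOvStep
      split_ifs with hc
      · rw [List.flatMap_append, pv_expand V L i hV hi ovs]
      · rfl
    rw [hstep]
    exact ih _ (fun k hk => his k (by simp [hk]))

-- fusing B's two folds (cols then overrides) into one fold over the column indices
theorem pv_fuse (V : List String) (e : List (List (Nat × Char))) :
    ∀ (is : List Nat) (acc : List (Nat × List Char)),
      ((is.foldl (fun acc i =>
          if 1 < (PySem.List.dedup (V.map (fun v => v.toList.getD i ' '))).length then
            acc ++ [(i, PySem.List.dedup (V.map (fun v => v.toList.getD i ' ')))]
          else acc) acc).foldl (fun ovs p =>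
            ovs ++ p.2.flatMap (fun c => ovs.map (fun ov => ov ++ [(p.1, c)]))) e)
        = is.foldl (fun ovs i => pvOvStep V ovs i)
            (acc.foldl (fun ovs p =>
              ovs ++ p.2.flatMap (fun c => ovs.map (fun ov => ov ++ [(p.1, c)]))) e) := by
  intro is
  induction is with
  | nil => intro acc; rfl
  | cons i is ih =>
    intro acc
    rw [List.foldl_cons, List.foldl_cons, ih]
    congr 1
    unfold pvOvStep
    split_ifs with hc
    · rw [List.foldl_append, List.foldl_cons, List.foldl_nil]
    · rfl

-- B's seen/out double loop builds exactly the set of the flatMap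
theorem pv_out (V : List String) :
    ∀ (ovs : List (List (Nat × Char))) (T : PySem.Set String),
      ovs.foldl (fun out ov =>
        V.foldl (fun out v => PySem.Set.add out (pvApply ov v)) out) T
        = PySem.Set.update T (ovs.flatMap (fun ov => V.map (pvApply ov))) := by
  intro ovs
  induction ovs with
  | nil => intro T; rfl
  | cons ov ovs ih =>
    intro T
    rw [List.foldl_cons, List.flatMap_cons, PySem.Set.update_append, ← ih,
      PySem.Set.update_map_eq_foldl_add]

-- ===== VERDICT (by name: the statement is the Claim_ definition above) =====
theorem Combinacion_rango_spec : Claim_equal_Combinacion_rango := by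
  intro ListaChunks cadena ri rf _ _
  unfold Spec_Combinacion_rango Combinacion_rango Combinacion_rango_alt
  dsimp only
  set W : List (List String) :=
    (if ri = rf then
      match PySem.List.pyGet? ListaChunks ri with
      | some ch => [ch]
      | none => []
    else PySem.List.slice ListaChunks (some ri) (some rf)) with hW
  rw [pv_variantes cadena W]
  set V : List String := PySem.List.dedup (cadena :: W.flatten) with hV
  unfold Combinacion_cadenas
  by_cases hck : 1 < (PySem.Set.ofList (V.map String.length)).length
  · rw [if_pos hck, if_pos hck]
  · rw [if_neg hck, if_neg hck]
    have hVnd : V.Nodup := by rw [hV]; exact PySem.List.nodup_dedup _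
    have hcad : cadena ∈ V := by
      rw [hV]; exact (PySem.List.mem_dedup _ _).mpr (by simp)
    have hVne : V ≠ [] := List.ne_nil_of_mem hcad
    have hhead : V.headD "" = cadena := by
      obtain ⟨t, ht⟩ := pv_dedup_cons_eq_self cadena W.flatten
      rw [hV, ht]; rfl
    have hofV : PySem.Set.ofList V = V := PySem.Set.ofList_eq_self_of_nodup _ hVnd
    have hlens : ∀ v ∈ V, v.toList.length = cadena.length := by
      intro v hv
      have := pv_len_le_one (V.map String.length) (by omega)
        (String.length v) (List.mem_map.mpr ⟨v, hv, rfl⟩)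
        (String.length cadena) (List.mem_map.mpr ⟨cadena, hcad, rfl⟩)
      simpa using this
    have hA : (List.range (V.headD "").length).foldl (fun combinaciones i =>
        (List.range V.length).foldl (fun combinaciones j =>
          if V.all (fun cadena =>
              cadena.toList.getD i ' ' == (V.getD j "").toList.getD i ' ') then
            combinaciones
          else
            combinaciones.foldl (fun combs combinacion =>
              PySem.Set.add combs (pvSubstA combinacion i ((V.getD j "").toList.getD i ' ')))
              combinaciones)
          combinaciones) (PySem.Set.ofList V)
        = (List.range cadena.length).foldl (fun S i => pvStepA V i S) V := by
      rw [hhead, hofV]; rfl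
    rw [hA]
    have hir : ∀ i ∈ List.range cadena.length, i < cadena.length :=
      fun i hi => List.mem_range.mp hi
    obtain ⟨heq, _⟩ := pv_fold_eq V cadena.length hlens hVne
      (List.range cadena.length) V hir
      ⟨hVnd, hlens, fun s hs k _ => ⟨s, hs, rfl⟩⟩
    rw [heq]
    have hVid : V.map (pvApply []) = V := by
      have hv : ∀ v ∈ V, pvApply [] v = v := by
        intro v _
        simp [pvApply]
      rw [List.map_congr_left hv, List.map_id']
    have hstart : V = ([([] : List (Nat × Char))]).flatMap (fun ov => V.map (pvApply ov)) := by
      rw [List.flatMap_cons, List.flatMap_nil, List.append_nil, hVid]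
    have hT1' := pv_T1 V (List.range cadena.length) V
    rw [hofV] at hT1'
    have hT2' := pv_T2 V cadena.length hlens (List.range cadena.length)
      [([] : List (Nat × Char))] hir
    rw [← hstart] at hT2'
    rw [hT1', hT2', pv_out, pv_fuse, List.foldl_nil, PySem.Set.update_nil_left]
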